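-- pv_equiv track=rewrite | github.com/MrIncredibuell/advent-of-code-2024 | day22/main.py | part1
-- ===== SOURCE A (Python) =====
-- def mix(x, secret):
--     return x ^ secret
--
-- def prune(secret):
--     return secret % 16777216
--
-- def evolve(secret):
--     secret = prune(mix(secret * 64, secret))
--     secret = prune(mix((secret // 32), secret))
--     secret = prune(mix(secret * 2048, secret))
--     return secret
--
-- def part1(data):
--     s = 0
--     for x in data:
--         y = x
--         for _ in range(2000):
--             y = evolve(y)
--         s += y
--     return s
-- ===== SOURCE B (Python) =====
-- def part1(data):
--     M = 1 << 24
--     mask = M - 1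
--
--     def step(y):
--         y = ((y << 6) ^ y) & mask
--         y = ((y >> 5) ^ y) & mask
--         y = ((y << 11) ^ y) & mask
--         return y
--
--     def apply(cols, y):
--         r = 0
--         for i, c in enumerate(cols):
--             if (y >> i) & 1:
--                 r ^= c
--         return r
--
--     def compose(f, g):
--         return [apply(f, c) for c in g]
--
--     base = [step(1 << i) for i in range(24)]   # matrix of one evolve step over GF(2)
--     P = [1 << i for i in range(24)]            # identity
--     e = 2000
--     while e:                                   # P = base ** 2000 by binary exponentiation
--         if e & 1:
--             P = compose(base, P)
--         base = compose(base, base)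
--         e >>= 1
--     return sum(apply(P, x % M) for x in data)
-- ===== Notes on version B (the rewrite author's own statement) =====
-- stated objective: faster
-- what changed: B exploits that one PRNG step is a GF(2)-linear map on 24 bits: it builds the 24-column bit matrix of one step, raises it to the 2000th power by binary exponentiation, and applies the resulting matrix once per seed, instead of A's 2000 evolve iterations per seed.
import Mathlib
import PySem

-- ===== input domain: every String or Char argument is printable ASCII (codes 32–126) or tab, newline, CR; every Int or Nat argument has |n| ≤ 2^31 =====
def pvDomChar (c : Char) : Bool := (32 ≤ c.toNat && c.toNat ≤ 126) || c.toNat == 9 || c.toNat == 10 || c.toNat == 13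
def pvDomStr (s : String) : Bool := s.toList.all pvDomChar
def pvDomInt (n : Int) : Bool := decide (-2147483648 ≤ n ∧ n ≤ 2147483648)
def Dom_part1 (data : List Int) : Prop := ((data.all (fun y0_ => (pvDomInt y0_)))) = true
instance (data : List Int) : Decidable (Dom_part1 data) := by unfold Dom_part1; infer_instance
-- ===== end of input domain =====

-- B replaces A's 2000 evolve iterations per seed by one application of the 2000th power
-- (computed once, by binary exponentiation) of the GF(2) bit matrix of a single step: faster.

-- ===== PORT A =====
def mix (x secret : Int) : Int := PySem.Int.bxor x secret

def prune (secret : Int) : Int := PySem.Int.mod secret 16777216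

def evolve (secret : Int) : Int :=
  let s1 := prune (mix (secret * 64) secret)
  let s2 := prune (mix (PySem.Int.floordiv s1 32) s1)
  prune (mix (s2 * 2048) s2)

def part1 (data : List Int) : Int :=
  data.foldl (fun s x => s + (List.range 2000).foldl (fun y _ => evolve y) x) 0

-- ===== PORT B =====
-- one PRNG step on the 24-bit state, written with shifts and masks (Source B's `step`)
def altStep (y : Nat) : Nat :=
  let y1 := ((y <<< 6) ^^^ y) &&& 16777215
  let y2 := ((y1 >>> 5) ^^^ y1) &&& 16777215
  ((y2 <<< 11) ^^^ y2) &&& 16777215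

-- Source B's `apply`: `for i, c in enumerate(cols): if (y >> i) & 1: r ^= c` (index counter + accumulator)
def altApply (cols : List Nat) (y : Nat) : Nat :=
  (cols.foldl (fun (p : Nat × Nat) c =>
    (p.1 + 1, if (y >>> p.1) &&& 1 = 1 then p.2 ^^^ c else p.2)) (0, 0)).2

-- Source B's `compose`: columns of f ∘ g
def altCompose (f g : List Nat) : List Nat := g.map (altApply f)

-- Source B's `while e:` binary-exponentiation loop
def altPow (base P : List Nat) (e : Nat) : List Nat :=
  if e = 0 then P
  else altPow (altCompose base base) (if e &&& 1 = 1 then altCompose base P else P) (e >>> 1)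
  termination_by e
  decreasing_by
    have : e >>> 1 = e / 2 := Nat.shiftRight_one e
    omega

def part1_alt (data : List Int) : Int :=
  let base := (List.range 24).map (fun i => altStep (1 <<< i))
  let P := altPow base ((List.range 24).map (fun i => 1 <<< i)) 2000
  (data.map (fun x => ((altApply P (PySem.Int.mod x 16777216).toNat : Nat) : Int))).sum

-- ===== PRECONDITION & SPEC =====
def Spec_part1 (data : List Int) (out : Int) : Prop := out = part1_alt data
instance (data : List Int) (out : Int) : Decidable (Spec_part1 data out) := by unfold Spec_part1; infer_instance

-- ===== CLAIM (what is proved, stated in full; the proofs are below) =====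
def Claim_equal_part1 : Prop := ∀ (data : List Int), Dom_part1 data → Spec_part1 data (part1 data)

-- ===== LEMMAS AND PROOFS =====

theorem altStep_lt (y : Nat) : altStep y < 16777216 := by
  have := Nat.and_le_right (n := ((((((y <<< 6) ^^^ y) &&& 16777215) >>> 5) ^^^ (((y <<< 6) ^^^ y) &&& 16777215)) &&& 16777215) <<< 11 ^^^ ((((((y <<< 6) ^^^ y) &&& 16777215) >>> 5) ^^^ (((y <<< 6) ^^^ y) &&& 16777215)) &&& 16777215)) (m := 16777215)
  simp only [altStep]
  omega

theorem iterStep_lt (k y : Nat) (h : y < 16777216) : altStep^[k] y < 16777216 := by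
  induction k generalizing y with
  | zero => simpa using h
  | succ k ih => rw [Function.iterate_succ_apply]; exact ih _ (altStep_lt y)

theorem altStep_linear (a b : Nat) : altStep (a ^^^ b) = altStep a ^^^ altStep b := by
  have l1 : ∀ a b : Nat, (((a^^^b) <<< 6) ^^^ (a^^^b)) &&& 16777215
      = (((a <<< 6) ^^^ a) &&& 16777215) ^^^ (((b <<< 6) ^^^ b) &&& 16777215) := by
    intro a b
    rw [Nat.shiftLeft_xor_distrib, ← Nat.and_xor_distrib_right]
    congr 1
    simp [Nat.xor_assoc, Nat.xor_comm, Nat.xor_left_comm]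
  have l2 : ∀ a b : Nat, (((a^^^b) >>> 5) ^^^ (a^^^b)) &&& 16777215
      = (((a >>> 5) ^^^ a) &&& 16777215) ^^^ (((b >>> 5) ^^^ b) &&& 16777215) := by
    intro a b
    rw [Nat.shiftRight_xor_distrib, ← Nat.and_xor_distrib_right]
    congr 1
    simp [Nat.xor_assoc, Nat.xor_comm, Nat.xor_left_comm]
  have l3 : ∀ a b : Nat, (((a^^^b) <<< 11) ^^^ (a^^^b)) &&& 16777215
      = (((a <<< 11) ^^^ a) &&& 16777215) ^^^ (((b <<< 11) ^^^ b) &&& 16777215) := by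
    intro a b
    rw [Nat.shiftLeft_xor_distrib, ← Nat.and_xor_distrib_right]
    congr 1
    simp [Nat.xor_assoc, Nat.xor_comm, Nat.xor_left_comm]
  simp only [altStep]
  rw [l1, l2, l3]

theorem mix_natCast (a b : Nat) : mix (a : Int) (b : Int) = ((a ^^^ b : Nat) : Int) := by
  simp [mix]

theorem prune_natCast (k : Nat) : prune (k : Int) = ((k % 16777216 : Nat) : Int) := by
  unfold prune
  rw [show (16777216:Int) = ((16777216:Nat):Int) by norm_num, PySem.Int.mod_natCast]

theorem prune_negSucc (m : Nat) : prune (Int.negSucc m) = ((16777215 - m % 16777216 : Nat) : Int) := by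
  unfold prune
  rw [PySem.Int.mod_eq_emod_of_pos (by norm_num), Int.negSucc_eq]
  omega

theorem bxor_negSucc (a b : Nat) :
    PySem.Int.bxor (Int.negSucc a) (Int.negSucc b) = ((a ^^^ b : Nat) : Int) := by
  have ha : ¬ (0:Int) ≤ Int.negSucc a := by rw [Int.negSucc_eq]; omega
  have hb : ¬ (0:Int) ≤ Int.negSucc b := by rw [Int.negSucc_eq]; omega
  simp only [PySem.Int.bxor, ha, hb, if_false, reduceIte]
  have h1 : -Int.negSucc a - 1 = (a : Int) := by rw [Int.negSucc_eq]; ring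
  have h2 : -Int.negSucc b - 1 = (b : Int) := by rw [Int.negSucc_eq]; ring
  rw [h1, h2, Int.toNat_natCast, Int.toNat_natCast]

theorem mask_mod (x : Nat) : x &&& 16777215 = x % 16777216 := by
  rw [show (16777215:Nat) = 2^24 - 1 by norm_num, Nat.and_two_pow_sub_one_eq_mod]

theorem nat_step1 (n : Nat) :
    ((n * 64) ^^^ n) % 16777216 = (((n % 16777216) <<< 6) ^^^ (n % 16777216)) &&& 16777215 := by
  rw [mask_mod, show (16777216:Nat) = 2^24 by norm_num,
    show n * 64 = n <<< 6 by rw [Nat.shiftLeft_eq]]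
  apply Nat.eq_of_testBit_eq
  intro i
  by_cases h24 : i < 24
  · by_cases h6 : 6 ≤ i
    · simp only [Nat.testBit_mod_two_pow, Nat.testBit_xor, Nat.testBit_shiftLeft, h24, h6,
        decide_true, Bool.true_and, ge_iff_le, (by omega : i - 6 < 24)]
    · simp only [Nat.testBit_mod_two_pow, Nat.testBit_xor, Nat.testBit_shiftLeft, h24, h6,
        decide_true, decide_false, Bool.true_and, Bool.false_and, ge_iff_le]
  · simp only [Nat.testBit_mod_two_pow, h24, decide_false, Bool.false_and]

theorem nat_step1_neg (m : Nat) :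
    ((64 * m + 63) ^^^ m) % 16777216
      = (((16777215 - m % 16777216) <<< 6) ^^^ (16777215 - m % 16777216)) &&& 16777215 := by
  have hgen : ∀ v, v = 2^24 - (m % 2^24 + 1) →
      ((64 * m + 63) ^^^ m) % 2^24 = ((v <<< 6) ^^^ v) &&& (2^24 - 1) := by
    intro v hv
    subst hv
    have hmlt : m % 2^24 < 2^24 := Nat.mod_lt _ (by norm_num)
    rw [Nat.and_two_pow_sub_one_eq_mod]
    apply Nat.eq_of_testBit_eq
    intro i
    by_cases h24 : i < 24
    · have h63 : (63:Nat) < 2^6 := by norm_num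
      have h63bit : ∀ j, (63:Nat).testBit j = decide (j < 6) := by
        intro j
        rw [show (63:Nat) = 2^6 - 1 by norm_num, Nat.testBit_two_pow_sub_one]
      have hmul : ∀ j, (64 * m + 63).testBit j
          = if j < 6 then (63:Nat).testBit j else m.testBit (j - 6) := by
        intro j
        rw [show 64 * m + 63 = 2^6 * m + 63 by ring, Nat.testBit_two_pow_mul_add m h63 j]
      by_cases h6 : 6 ≤ i
      · simp only [Nat.testBit_mod_two_pow, Nat.testBit_xor, Nat.testBit_shiftLeft, hmul,
          Nat.testBit_two_pow_sub_succ hmlt, h24, (by omega : ¬ i < 6), h6,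
          (by omega : i - 6 < 24), decide_true, decide_false, Bool.true_and, Bool.false_and,
          if_false, reduceIte, ge_iff_le]
        cases hmi : m.testBit (i - 6) <;> cases hmj : m.testBit i <;> simp [h63bit] <;> omega
      · simp only [Nat.testBit_mod_two_pow, Nat.testBit_xor, Nat.testBit_shiftLeft, hmul,
          Nat.testBit_two_pow_sub_succ hmlt, h24, (by omega : i < 6), h6,
          Nat.testBit_two_pow_sub_one, decide_true, decide_false, Bool.true_and, Bool.false_and,
          if_true, reduceIte, ge_iff_le]
        cases hmj : m.testBit i <;> simp [h63bit] <;> omega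
    · simp only [Nat.testBit_mod_two_pow, h24, decide_false, Bool.false_and]
  have h := hgen (16777215 - m % 16777216) (by omega)
  norm_num at h
  exact h

theorem tail2 (n1 : Nat) :
    prune (mix (PySem.Int.floordiv (n1 : Int) 32) (n1 : Int))
      = ((((n1 >>> 5) ^^^ n1) &&& 16777215 : Nat) : Int) := by
  rw [show (32:Int) = ((32:Nat):Int) by norm_num, PySem.Int.floordiv_natCast,
    mix_natCast, prune_natCast, mask_mod,
    show n1 / 32 = n1 >>> 5 by rw [Nat.shiftRight_eq_div_pow]]

theorem tail3 (n2 : Nat) :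
    prune (mix ((n2 : Int) * 2048) (n2 : Int))
      = ((((n2 <<< 11) ^^^ n2) &&& 16777215 : Nat) : Int) := by
  rw [show ((n2:Int) * 2048) = ((n2 * 2048 : Nat) : Int) by push_cast; ring,
    mix_natCast, prune_natCast, mask_mod,
    show n2 * 2048 = n2 <<< 11 by rw [Nat.shiftLeft_eq]]

-- evolve s = altStep applied to the 24-bit reduction of s  (the central A-vs-B step lemma)
theorem evolve_eq (s : Int) : evolve s = ((altStep ((PySem.Int.mod s 16777216).toNat) : Nat) : Int) := by
  cases s with
  | ofNat n =>
    have hu : (PySem.Int.mod (Int.ofNat n) 16777216).toNat = n % 16777216 := by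
      rw [show Int.ofNat n = (n : Int) from rfl,
        show (16777216:Int) = ((16777216:Nat):Int) by norm_num, PySem.Int.mod_natCast,
        Int.toNat_natCast]
    rw [hu]
    show evolve (n : Int) = _
    simp only [evolve]
    rw [show ((n:Int) * 64) = ((n * 64 : Nat) : Int) by push_cast; ring,
      mix_natCast, prune_natCast, nat_step1, tail2, tail3]
    simp only [altStep]
  | negSucc m =>
    have hu : (PySem.Int.mod (Int.negSucc m) 16777216).toNat = 16777215 - m % 16777216 := by
      have := prune_negSucc m
      unfold prune at this
      rw [this, Int.toNat_natCast]
    rw [hu]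
    simp only [evolve]
    rw [show (Int.negSucc m * 64) = Int.negSucc (64 * m + 63) by
        rw [Int.negSucc_eq, Int.negSucc_eq]; push_cast; ring,
      show mix (Int.negSucc (64 * m + 63)) (Int.negSucc m)
          = (((64 * m + 63) ^^^ m : Nat) : Int) from bxor_negSucc _ _,
      prune_natCast, nat_step1_neg, tail2, tail3]
    simp only [altStep]

theorem evolve_natCast (v : Nat) (h : v < 16777216) : evolve (v : Int) = ((altStep v : Nat) : Int) := by
  rw [evolve_eq,
    show (16777216:Int) = ((16777216:Nat):Int) by norm_num, PySem.Int.mod_natCast,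
    Int.toNat_natCast, Nat.mod_eq_of_lt h]

theorem loopA_eq (k : Nat) (x : Int) :
    (List.range (k+1)).foldl (fun y _ => evolve y) x
      = ((altStep^[k] (altStep ((PySem.Int.mod x 16777216).toNat)) : Nat) : Int) := by
  induction k with
  | zero =>
    simp only [List.range_one, List.foldl_cons, List.foldl_nil, Function.iterate_zero, id_eq]
    exact evolve_eq x
  | succ k ih =>
    rw [List.range_succ, List.foldl_append, List.foldl_cons, List.foldl_nil, ih]
    have hu : (PySem.Int.mod x 16777216).toNat < 16777216 := by
      have h1 := PySem.Int.mod_lt (a := x) (b := 16777216) (by norm_num)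
      have h2 := PySem.Int.mod_nonneg (a := x) (b := 16777216) (by norm_num)
      omega
    have hlt : altStep^[k] (altStep ((PySem.Int.mod x 16777216).toNat)) < 16777216 := by
      rw [← Function.iterate_succ_apply]
      exact iterStep_lt _ _ hu
    rw [evolve_natCast _ hlt, Function.iterate_succ_apply']

-- recursive form of Source B's apply loop
def applyAux (cols : List Nat) (i r y : Nat) : Nat :=
  match cols with
  | [] => r
  | c :: cs => applyAux cs (i+1) (if (y >>> i) &&& 1 = 1 then r ^^^ c else r) y

theorem altApply_eq_aux (cols : List Nat) (y : Nat) : altApply cols y = applyAux cols 0 0 y := by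
  
  suffices h : ∀ (cs : List Nat) (i r : Nat),
      (cs.foldl (fun (p : Nat × Nat) c =>
        (p.1 + 1, if (y >>> p.1) &&& 1 = 1 then p.2 ^^^ c else p.2)) (i, r)).2 = applyAux cs i r y by
    simpa [altApply] using h cols 0 0
  intro cs
  induction cs with
  | nil => intro i r; simp [applyAux]
  | cons c cs ih =>
    intro i r
    simp only [List.foldl_cons, applyAux]
    exact ih (i+1) _

theorem nat_xor_cancel_left (a b : Nat) : a ^^^ (a ^^^ b) = b := by
  rw [← Nat.xor_assoc, Nat.xor_self, Nat.zero_xor]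

theorem bitCond (z i : Nat) : ((z >>> i) &&& 1 = 1) ↔ z.testBit i := by
  simp [Nat.and_one_is_mod, Nat.shiftRight_eq_div_pow, Nat.testBit_eq_decide_div_mod_eq]

theorem applyAux_xor (cols : List Nat) :
    ∀ i ra rb a b, applyAux cols i (ra ^^^ rb) (a ^^^ b) = applyAux cols i ra a ^^^ applyAux cols i rb b := by
  induction cols with
  | nil => intro i ra rb a b; simp [applyAux]
  | cons c cs ih =>
    intro i ra rb a b
    simp only [applyAux, bitCond, Nat.testBit_xor]
    by_cases ha : a.testBit i <;> by_cases hb : b.testBit i <;>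
      simp only [ha, hb, Bool.xor_false, Bool.xor_true, Bool.not_true, Bool.not_false,
        Bool.true_xor, Bool.false_xor, if_true, if_false, Bool.xor_self, reduceIte]
    · rw [show ra ^^^ rb = (ra ^^^ c) ^^^ (rb ^^^ c) by
        simp [Nat.xor_assoc, Nat.xor_comm, Nat.xor_left_comm, nat_xor_cancel_left]]
      exact ih _ _ _ _ _
    · rw [show (ra ^^^ rb) ^^^ c = (ra ^^^ c) ^^^ rb by
        simp [Nat.xor_assoc, Nat.xor_comm, Nat.xor_left_comm]]
      exact ih _ _ _ _ _
    · rw [show (ra ^^^ rb) ^^^ c = ra ^^^ (rb ^^^ c) by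
        simp [Nat.xor_assoc]]
      exact ih _ _ _ _ _
    · exact ih _ _ _ _ _

theorem applyAux_high (cols : List Nat) : ∀ i r j, j < i → applyAux cols i r (2^j) = r := by
  induction cols with
  | nil => intro i r j _; simp [applyAux]
  | cons c cs ih =>
    intro i r j hj
    have : ¬ (2^j : Nat).testBit i := by simp [Nat.testBit_two_pow_of_ne (by omega : j ≠ i)]
    simp only [applyAux, bitCond, this, Bool.false_eq_true, if_false, reduceIte]
    exact ih (i+1) r j (by omega)

theorem applyAux_basis (cols : List Nat) :
    ∀ i r j, i ≤ j → j < i + cols.length → applyAux cols i r (2^j) = r ^^^ cols.getD (j - i) 0 := by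
  induction cols with
  | nil => intro i r j h1 h2; simp at h2; omega
  | cons c cs ih =>
    intro i r j h1 h2
    by_cases hij : i = j
    · subst hij
      simp only [applyAux, bitCond, Nat.testBit_two_pow_self, if_true, reduceIte]
      rw [applyAux_high cs (i+1) _ i (by omega)]
      simp
    · have : ¬ (2^j : Nat).testBit i := by simp [Nat.testBit_two_pow_of_ne (by omega : j ≠ i)]
      simp only [applyAux, bitCond, this, Bool.false_eq_true, if_false, reduceIte]
      rw [ih (i+1) r j (by omega) (by simp at h2 ⊢; omega)]
      have hji : j - i = (j - (i+1)) + 1 := by omega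
      rw [hji, List.getD_cons_succ]

theorem applyAux_map (F : Nat → Nat) (hF : ∀ a b, F (a ^^^ b) = F a ^^^ F b)
    (cols : List Nat) : ∀ i r y, applyAux (cols.map F) i (F r) y = F (applyAux cols i r y) := by
  induction cols with
  | nil => intro i r y; simp [applyAux]
  | cons c cs ih =>
    intro i r y
    simp only [List.map_cons, applyAux]
    split
    · rw [← hF, ih]
    · exact ih _ _ _

theorem altApply_linear (cols : List Nat) (a b : Nat) :
    altApply cols (a ^^^ b) = altApply cols a ^^^ altApply cols b := by
  rw [altApply_eq_aux, altApply_eq_aux, altApply_eq_aux]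
  have h0 : (0 : Nat) = 0 ^^^ 0 := by simp
  rw [h0]
  exact applyAux_xor cols 0 0 0 a b

theorem two_pow_xor_eq_add (k m : Nat) (h : m < 2^k) : 2^k ^^^ m = 2^k + m := by
  apply Nat.eq_of_testBit_eq
  intro i
  rw [Nat.testBit_xor, show 2^k + m = 2^k * 1 + m from by ring,
    Nat.testBit_two_pow_mul_add 1 h i]
  rcases lt_trichotomy i k with hik | hik | hik
  · simp [Nat.testBit_two_pow_of_ne (by omega : k ≠ i), hik]
  · subst hik
    simp [Nat.testBit_two_pow_self, Nat.testBit_lt_two_pow h,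
      Nat.testBit_zero]
  · have h1 : ¬ i < k := by omega
    have h2 : (1:Nat).testBit (i - k) = false :=
      Nat.testBit_lt_two_pow (by
        calc (1:Nat) < 2^1 := by norm_num
        _ ≤ 2^(i-k) := Nat.pow_le_pow_right (by norm_num) (by omega))
    simp [Nat.testBit_two_pow_of_ne (by omega : k ≠ i), h1, h2,
      Nat.testBit_lt_two_pow (show m < 2^i by
        calc m < 2^k := h
        _ ≤ 2^i := Nat.pow_le_pow_right (by norm_num) (by omega))]

theorem agree_of_basis (f g : Nat → Nat)
    (hf : ∀ a b, f (a ^^^ b) = f a ^^^ f b) (hg : ∀ a b, g (a ^^^ b) = g a ^^^ g b)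
    (hb : ∀ j, j < 24 → f (2^j) = g (2^j)) :
    ∀ y, y < 16777216 → f y = g y := by
  have hf0 : f 0 = 0 := by
    have h := hf 0 0; simp at h; omega
  have hg0 : g 0 = 0 := by
    have h := hg 0 0; simp at h; omega
  suffices h : ∀ k, k ≤ 24 → ∀ y, y < 2^k → f y = g y by
    intro y hy
    exact h 24 le_rfl y (by norm_num; omega)
  intro k
  induction k with
  | zero =>
    intro _ y hy
    interval_cases y
    rw [hf0, hg0]
  | succ k ih =>
    intro hk y hy
    by_cases hlt : y < 2^k
    · exact ih (by omega) y hlt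
    · have hm : y - 2^k < 2^k := by
        have hpow : (2:Nat)^(k+1) = 2^k + 2^k := by ring
        omega
      have hdec : y = 2^k ^^^ (y - 2^k) := by
        rw [two_pow_xor_eq_add k _ hm]; omega
      rw [hdec, hf, hg, ih (by omega) _ hm, hb k (by omega)]

def RepN (cols : List Nat) (k : Nat) : Prop :=
  cols.length = 24 ∧ (∀ c ∈ cols, c < 16777216) ∧
    ∀ y, y < 16777216 → altApply cols y = altStep^[k] y

theorem rep_base : RepN ((List.range 24).map (fun i => altStep (1 <<< i))) 1 := by
  refine ⟨by simp, ?_, ?_⟩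
  · intro c hc
    simp only [List.mem_map, List.mem_range] at hc
    obtain ⟨i, _, rfl⟩ := hc
    exact altStep_lt _
  · intro y hy
    apply agree_of_basis _ (fun y => altStep^[1] y)
      (altApply_linear _) (by simpa using altStep_linear) _ y hy
    intro j hj
    rw [altApply_eq_aux]
    have hb := applyAux_basis ((List.range 24).map (fun i => altStep (1 <<< i))) 0 0 j
      (by omega) (by simpa using hj)
    simp only [Nat.sub_zero] at hb
    rw [hb, Nat.zero_xor, PySem.List.getD_map_range _ _ _ _ hj]
    simp [Nat.shiftLeft_eq]

theorem rep_id : RepN ((List.range 24).map (fun i => 1 <<< i)) 0 := by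
  refine ⟨by simp, ?_, ?_⟩
  · intro c hc
    simp only [List.mem_map, List.mem_range] at hc
    obtain ⟨i, hi, rfl⟩ := hc
    calc (1:Nat) <<< i = 2^i := by simp [Nat.shiftLeft_eq]
    _ < 2^24 := Nat.pow_lt_pow_right (by norm_num) hi
    _ = 16777216 := by norm_num
  · intro y hy
    apply agree_of_basis _ (fun y => altStep^[0] y)
      (altApply_linear _) (by simp) _ y hy
    intro j hj
    rw [altApply_eq_aux]
    have hb := applyAux_basis ((List.range 24).map (fun i => 1 <<< i)) 0 0 j
      (by omega) (by simpa using hj)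
    simp only [Nat.sub_zero] at hb
    rw [hb, Nat.zero_xor, PySem.List.getD_map_range _ _ _ _ hj]
    simp [Nat.shiftLeft_eq]

theorem rep_compose {c1 c2 : List Nat} {k1 k2 : Nat} (h1 : RepN c1 k1) (h2 : RepN c2 k2) :
    RepN (altCompose c1 c2) (k1 + k2) := by
  obtain ⟨hl1, hc1, hs1⟩ := h1
  obtain ⟨hl2, hc2, hs2⟩ := h2
  refine ⟨by simpa [altCompose], ?_, ?_⟩
  · intro c hc
    simp only [altCompose, List.mem_map] at hc
    obtain ⟨d, hd, rfl⟩ := hc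
    rw [hs1 d (hc2 d hd)]
    exact iterStep_lt _ _ (hc2 d hd)
  · intro y hy
    have hmap := applyAux_map (altApply c1) (altApply_linear c1) c2 0 0 y
    have h10 : altApply c1 0 = 0 := by
      have h := altApply_linear c1 0 0; simp at h; omega
    rw [h10] at hmap
    rw [altApply_eq_aux, altCompose, hmap, ← altApply_eq_aux]
    rw [hs2 y hy, hs1 _ (iterStep_lt _ _ hy), ← Function.iterate_add_apply]

theorem rep_pow {base P : List Nat} {m n : Nat} (hb : RepN base m) (hP : RepN P n) (e : Nat) :
    RepN (altPow base P e) (n + m * e) := by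
  induction e using Nat.strong_induction_on generalizing base P m n with
  | _ e ih =>
    rw [altPow]
    by_cases he : e = 0
    · simpa [he] using hP
    · rw [if_neg he]
      have hd : e >>> 1 = e / 2 := Nat.shiftRight_one e
      have hP' : RepN (if e &&& 1 = 1 then altCompose base P else P)
          (if e &&& 1 = 1 then m + n else n) := by
        split
        · exact rep_compose hb hP
        · exact hP
      have := ih (e >>> 1) (by omega) (rep_compose hb hb) hP'
      have harith : (if e &&& 1 = 1 then m + n else n) + (m + m) * (e >>> 1) = n + m * e := by
        have h1 : e &&& 1 = e % 2 := Nat.and_one_is_mod e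
        rw [hd]
        by_cases hp : e % 2 = 1
        · have hq : e = 2 * (e / 2) + 1 := by omega
          simp only [h1, hp, if_true, reduceIte]
          calc m + n + (m + m) * (e / 2) = n + m * (2 * (e / 2) + 1) := by ring
          _ = n + m * e := by rw [← hq]
        · have hq : e = 2 * (e / 2) := by omega
          simp only [h1, hp, if_false, reduceIte]
          calc n + (m + m) * (e / 2) = n + m * (2 * (e / 2)) := by ring
          _ = n + m * e := by rw [← hq]
      rw [harith] at this
      exact this

theorem foldl_add_eq_sum (F G : Int → Int) (hFG : ∀ x, F x = G x) :
    ∀ (l : List Int) (s : Int), l.foldl (fun s x => s + F x) s = s + (l.map G).sum := by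
  intro l
  induction l with
  | nil => intro s; simp
  | cons a l ih =>
    intro s
    rw [List.foldl_cons, ih, hFG, List.map_cons, List.sum_cons]
    ring

-- ===== VERDICT (by name: the statement is the Claim_ definition above) =====
theorem part1_spec : Claim_equal_part1 := by
  unfold Claim_equal_part1
  intro data _
  unfold Spec_part1
  have hrep : RepN (altPow ((List.range 24).map (fun i => altStep (1 <<< i))) ((List.range 24).map (fun i => 1 <<< i)) 2000) 2000 := by
    have h := rep_pow rep_base rep_id 2000
    simpa using h
  obtain ⟨-, -, hsem⟩ := hrep
  have key : ∀ x : Int, (List.range 2000).foldl (fun y _ => evolve y) x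
      = ((altApply (altPow ((List.range 24).map (fun i => altStep (1 <<< i))) ((List.range 24).map (fun i => 1 <<< i)) 2000) ((PySem.Int.mod x 16777216).toNat) : Nat) : Int) := by
    intro x
    have hu : (PySem.Int.mod x 16777216).toNat < 16777216 := by
      have h1 := PySem.Int.mod_lt (a := x) (b := 16777216) (by norm_num)
      have h2 := PySem.Int.mod_nonneg (a := x) (b := 16777216) (by norm_num)
      omega
    rw [show (2000:Nat) = 1999 + 1 from rfl, loopA_eq, ← Function.iterate_succ_apply,
      hsem _ hu]
  simp only [part1, part1_alt]
  have h := foldl_add_eq_sum (fun x => (List.range 2000).foldl (fun y _ => evolve y) x)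
    (fun x => ((altApply (altPow ((List.range 24).map (fun i => altStep (1 <<< i))) ((List.range 24).map (fun i => 1 <<< i)) 2000) ((PySem.Int.mod x 16777216).toNat) : Nat) : Int)) key data 0
  simpa using h
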